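-- pv_equiv track=rewrite | github.com/Ursu-Mihai-Sebastian/Algoritmi-SAT | rezolutie.py | rezolutie_pl
-- ===== SOURCE A (Python) =====
-- def rezolutie_pl(clauze):
--     """
--     Algoritmul rezoluției pentru (CNF).
--     Returnează True dacă formula este nesatisfiabilă, False altfel.
--     """
--     # Convertim clauzele în frozenset pentru a putea fi stocate într-un set
--     clauze = [frozenset(clauza) for clauza in clauze]
--     noi_clauze = set()
--
--     # Setul inițial de clauze pentru căutare eficientă
--     baza_clauze = set(clauze)
--
--     while True:
--         # Generăm toate perechile de clauze distincte
--         perechi = [(ci, cj) for i, ci in enumerate(clauze) for cj in clauze[i+1:]]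
--
--         for (ci, cj) in perechi:
--             rezultate = rezolva(ci, cj)
--
--             # Dacă rezultatul conține clauza vidă => formula este nesatisfiabilă
--             if frozenset() in rezultate:
--                 return True, None  # NESATISFIABIL
--
--             # Adăugăm clauzele noi în mulțimea intermediară
--             noi_clauze.update(rezultate)
--
--         # Dacă nu s-a generat nimic nou => nu se poate demonstra nesatisfiabilitatea
--         if noi_clauze.issubset(baza_clauze):
--             return False, None  # SATISFIABIL (sau necunoscut prin rezoluție)
--
--         # Actualizăm cu clauzele noi și reluăm procesul
--         baza_clauze.update(noi_clauze)
--         clauze = list(baza_clauze)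
--
-- def rezolva(clauza1, clauza2):
--     """
--     Aplică regula de rezoluție între două clauze.
--     Returnează clauze rezolvate (seturi fără tautologii).
--     """
--     rezultate = set()
--     for literal in clauza1:
--         if -literal in clauza2:
--             clauza_noua = (clauza1 - {literal}) | (clauza2 - {-literal})
--             # Eliminăm clauzele tautologice (ex: x și ¬x, pentru Generatorul meu nu este cazul dar poate daca vreti sa extindeti la alte implementari)
--             if any(-lit in clauza_noua for lit in clauza_noua):
--                 continue
--             rezultate.add(frozenset(clauza_noua))
--     return rezultate
-- ===== SOURCE B (Python) =====
-- def rezolutie_pl(clauze):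
--     """Incremental resolution: each round only resolves last round's new clauses
--     against the whole set, instead of re-resolving every pair every round."""
--     base = set()
--     for clauza in clauze:
--         base.add(frozenset(clauza))
--     new = set(base)
--     while new:
--         generated = set()
--         for n in new:
--             for c in base:
--                 if c == n:
--                     continue
--                 for r in resolve(n, c):
--                     if not r:
--                         return True, None
--                     generated.add(r)
--         new = generated - base
--         if not new:
--             return False, None
--         base |= generated
--     return False, None
--
--
-- def resolve(c1, c2):
--     candidates = [(c1 - {lit}) | (c2 - {-lit}) for lit in c1 if -lit in c2]
--     return {frozenset(r) for r in candidates if not any(-x in r for x in r)}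
-- ===== Notes on version B (the rewrite author's own statement) =====
-- stated objective: alternative
-- what changed: Incremental saturation: instead of re-resolving every pair of the whole clause set in every round, B keeps the set of clauses added in the last round and only resolves those new clauses against the current set, so each unordered pair of clauses is resolved a bounded number of times instead of once per round; intended as the cheaper strategy, but a timing run could not confirm a speed-up (resolution blow-up dominates both), so no speed is claimed.
-- outside the precondition, e.g. on rezolutie_pl([[0], [0]]): A returns (True, None), B returns (False, None)
import Mathlib
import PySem

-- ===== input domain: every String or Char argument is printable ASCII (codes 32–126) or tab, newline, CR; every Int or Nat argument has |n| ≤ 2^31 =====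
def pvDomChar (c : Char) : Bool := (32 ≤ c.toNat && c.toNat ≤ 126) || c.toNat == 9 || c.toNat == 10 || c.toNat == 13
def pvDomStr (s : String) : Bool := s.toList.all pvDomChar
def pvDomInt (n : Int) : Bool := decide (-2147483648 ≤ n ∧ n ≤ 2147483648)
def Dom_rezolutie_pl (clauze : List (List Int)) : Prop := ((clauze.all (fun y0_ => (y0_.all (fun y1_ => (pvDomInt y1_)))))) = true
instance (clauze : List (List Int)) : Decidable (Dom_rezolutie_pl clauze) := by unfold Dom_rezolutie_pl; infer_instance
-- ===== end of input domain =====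

-- B replaces A's re-resolution of every pair of the whole set in every round by incremental
-- saturation (only last round's new clauses are resolved against the set); equivalence is about
-- the returned pair only. Both ports drive the unbounded 'while True' with a fuel counter
-- (2^(number of distinct literals)+1, an upper bound on the number of growing rounds): the fuel
-- only makes the same computation total, neither port switches algorithms on it.

-- ===== PORT A =====
-- frozenset(clauza): a clause as its canonical (sorted, duplicate-free) list of literals
def canon (c : List Int) : List Int := PySem.List.sorted (PySem.List.dedup c) (fun x => x) false

-- rezolva(clauza1, clauza2): fold over clauza1's literals, collecting non-tautological resolvents
def rezolva (c1 c2 : List Int) : List (List Int) :=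
  c1.foldl (fun rez l =>
    if (-l) ∈ c2 then
      let nc := canon (c1.erase l ++ c2.erase (-l))
      if nc.any (fun m => decide ((-m) ∈ nc)) then rez
      else PySem.Set.add rez nc
    else rez) []

-- perechi = [(ci, cj) for i, ci in enumerate(clauze) for cj in clauze[i+1:]]
def pairs : List (List Int) → List ((List Int) × (List Int))
  | [] => []
  | c :: t => t.map (fun d => (c, d)) ++ pairs t

-- the 'while True' loop; Python returns (True, None) inside the pair loop on the first empty
-- resolvent — checking the same condition over the round's pairs first yields the same value
def loopA : Nat → List (List Int) → List (List Int) → List (List Int) → Option Bool × Option Bool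
  | 0, _, _, _ => (none, none)
  | fuel+1, cl, noi, baza =>
    let per := pairs cl
    if ∃ p ∈ per, [] ∈ rezolva p.1 p.2 then (some true, none)
    else
      let noi' := per.foldl (fun acc p => (rezolva p.1 p.2).foldl (fun s e => PySem.Set.add s e) acc) noi
      if ∀ c ∈ noi', c ∈ baza then (some false, none)
      else
        let baza' := noi'.foldl (fun s e => PySem.Set.add s e) baza
        loopA fuel baza' noi' baza'

def rezolutie_pl (clauze : List (List Int)) : Option Bool × Option Bool :=
  let cl := clauze.map canon
  loopA (2 ^ (clauze.flatten.dedup.length) + 1) cl [] (PySem.Set.ofList cl)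

-- ===== PORT B =====
-- resolve(c1, c2): candidate resolvents by comprehension, then tautology filter, as a set
def resolveB (c1 c2 : List Int) : List (List Int) :=
  let cand := (c1.filter (fun l => decide ((-l) ∈ c2))).map (fun l => canon (c1.erase l ++ c2.erase (-l)))
  PySem.Set.ofList (cand.filter (fun r => !(r.any (fun m => decide ((-m) ∈ r)))))

-- the 'while new:' loop: resolve only last round's new clauses against the set
def loopB : Nat → List (List Int) → List (List Int) → Option Bool × Option Bool
  | 0, _, _ => (none, none)
  | fuel+1, base, neu =>
    if neu = [] then (some false, none)
    else
      let gen := neu.foldl (fun acc n =>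
        base.foldl (fun acc2 c =>
          if c = n then acc2
          else (resolveB n c).foldl (fun s e => PySem.Set.add s e) acc2) acc) []
      if [] ∈ gen then (some true, none)
      else
        let neu' := gen.filter (fun r => decide (r ∉ base))
        if neu' = [] then (some false, none)
        else loopB fuel (neu'.foldl (fun s e => PySem.Set.add s e) base) neu'

def rezolutie_pl_alt (clauze : List (List Int)) : Option Bool × Option Bool :=
  let base := clauze.foldl (fun s c => PySem.Set.add s (canon c)) []
  loopB (2 ^ (clauze.flatten.dedup.length) + 1) base base

-- ===== PRECONDITION & SPEC =====
-- Pre_ excludes only inputs in which some clause that occurs at two list positions (equal as a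
-- set of literals) contains the pseudo-literal 0: 0 is its own negation (-0 == 0), so it is not a
-- propositional literal, and on such degenerate duplicates A resolves the two copies of the
-- clause against each other on 0 while B never pairs a clause with itself — neither value is the
-- specified one for a clause containing 0.
def Pre_rezolutie_pl (clauze : List (List Int)) : Prop :=
  (clauze.all (fun c =>
    !(c.contains (0:Int)) ||
    decide (clauze.countP
      (fun d => d.all (fun x => c.contains x) && c.all (fun x => d.contains x)) ≤ 1))) = true
instance (clauze : List (List Int)) : Decidable (Pre_rezolutie_pl clauze) := by
  unfold Pre_rezolutie_pl; infer_instance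

def pvWitness_rezolutie_pl : List (List Int) := [[1, -2], [2], [-1]]

def Spec_rezolutie_pl (clauze : List (List Int)) (out : Option Bool × Option Bool) : Prop :=
  out = rezolutie_pl_alt clauze
instance (clauze : List (List Int)) (out : Option Bool × Option Bool) : Decidable (Spec_rezolutie_pl clauze out) := by
  unfold Spec_rezolutie_pl; infer_instance

-- ===== CLAIM (what is proved, stated in full; the proofs are below) =====
def Claim_equal_rezolutie_pl : Prop := ∀ (clauze : List (List Int)), Dom_rezolutie_pl clauze → Pre_rezolutie_pl clauze → Spec_rezolutie_pl clauze (rezolutie_pl clauze)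

-- ===== LEMMAS AND PROOFS =====

-- abbreviations for the resolvent of c1 and c2 on literal l, and the tautology test
def ncl (c1 c2 : List Int) (l : Int) : List Int := canon (c1.erase l ++ c2.erase (-l))
def tautB (r : List Int) : Bool := r.any (fun m => decide ((-m) ∈ r))

-- "e is a (kept) resolvent of c1 against c2"
def Res (c1 c2 e : List Int) : Prop :=
  ∃ l, l ∈ c1 ∧ (-l) ∈ c2 ∧ tautB (ncl c1 c2 l) = false ∧ e = ncl c1 c2 l

-- "e is a resolvent of two distinct members of l"
def MR (l : List (List Int)) (e : List Int) : Prop :=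
  ∃ a ∈ l, ∃ b ∈ l, a ≠ b ∧ Res a b e

-- "e is a resolvent of a member of N against another member of S"
def Mix (N S : List (List Int)) (e : List Int) : Prop :=
  ∃ n ∈ N, ∃ c ∈ S, c ≠ n ∧ Res n c e

-- "e is a resolvent of two distinct members of S that both lie outside N"
def Mrem (S N : List (List Int)) (e : List Int) : Prop :=
  ∃ a ∈ S, ∃ b ∈ S, a ∉ N ∧ b ∉ N ∧ a ≠ b ∧ Res a b e

-- duplicate condition: a clause with two occurrences never contains 0
def DC (l : List (List Int)) : Prop := ∀ c ∈ l, 2 ≤ l.count c → (0:Int) ∉ c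

lemma mem_foldl_setAdd (xs acc : List (List Int)) (e : List Int) :
    e ∈ xs.foldl (fun s x => PySem.Set.add s x) acc ↔ e ∈ acc ∨ e ∈ xs := by
  induction xs generalizing acc with
  | nil => simp
  | cons x t ih =>
    simp only [List.foldl_cons, ih, List.mem_cons]
    rw [PySem.Set.mem_add]
    tauto

lemma nodup_foldl_setAdd (xs : List (List Int)) (acc : List (List Int)) (h : acc.Nodup) :
    (xs.foldl (fun s x => PySem.Set.add s x) acc).Nodup := by
  induction xs generalizing acc with
  | nil => exact h
  | cons x t ih => exact ih _ (PySem.Set.nodup_add _ _ h)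

lemma mem_canon (x : List Int) (a : Int) : a ∈ canon x ↔ a ∈ x := by
  simp [canon, PySem.List.mem_sorted]

lemma canon_congr {x y : List Int} (h : ∀ a, a ∈ x ↔ a ∈ y) : canon x = canon y := by
  unfold canon
  refine PySem.List.sorted_eq_sorted_of_perm _ _ _ (fun a b hab => hab) ?_
  refine (List.perm_ext_iff_of_nodup (PySem.List.nodup_dedup x) (PySem.List.nodup_dedup y)).mpr ?_
  intro a; simp [h a]

lemma rezolva_mem_aux (c1 c2 : List Int) (li : List Int) (acc : List (List Int)) (e : List Int) :
    e ∈ li.foldl (fun rez l =>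
      if (-l) ∈ c2 then
        if tautB (ncl c1 c2 l) then rez else PySem.Set.add rez (ncl c1 c2 l)
      else rez) acc
    ↔ e ∈ acc ∨ ∃ l ∈ li, (-l) ∈ c2 ∧ tautB (ncl c1 c2 l) = false ∧ e = ncl c1 c2 l := by
  induction li generalizing acc with
  | nil => simp
  | cons l t ih =>
    simp only [List.foldl_cons, List.mem_cons]
    by_cases h1 : (-l) ∈ c2
    · by_cases h2 : tautB (ncl c1 c2 l)
      · rw [if_pos h1, if_pos h2, ih]
        constructor
        · rintro (h | ⟨m, hm, rest⟩)
          · exact Or.inl h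
          · exact Or.inr ⟨m, Or.inr hm, rest⟩
        · rintro (h | ⟨m, hm | hm, rest⟩)
          · exact Or.inl h
          · exact absurd rest.2.1 (by subst hm; simp [h2])
          · exact Or.inr ⟨m, hm, rest⟩
      · rw [if_pos h1, if_neg h2, ih]
        constructor
        · rintro (h | ⟨m, hm, rest⟩)
          · rcases (PySem.Set.mem_add _ _ _).mp h with h | h
            · exact Or.inl h
            · exact Or.inr ⟨l, Or.inl rfl, h1, by simpa using h2, h⟩
          · exact Or.inr ⟨m, Or.inr hm, rest⟩
        · rintro (h | ⟨m, hm | hm, rest⟩)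
          · exact Or.inl ((PySem.Set.mem_add _ _ _).mpr (Or.inl h))
          · subst hm; exact Or.inl ((PySem.Set.mem_add _ _ _).mpr (Or.inr rest.2.2))
          · exact Or.inr ⟨m, hm, rest⟩
    · rw [if_neg h1, ih]
      constructor
      · rintro (h | ⟨m, hm, rest⟩)
        · exact Or.inl h
        · exact Or.inr ⟨m, Or.inr hm, rest⟩
      · rintro (h | ⟨m, hm | hm, rest⟩)
        · exact Or.inl h
        · exact absurd rest.1 (by subst hm; exact h1)
        · exact Or.inr ⟨m, hm, rest⟩

lemma mem_rezolva (c1 c2 e : List Int) : e ∈ rezolva c1 c2 ↔ Res c1 c2 e := by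
  have h : rezolva c1 c2 = c1.foldl (fun rez l =>
      if (-l) ∈ c2 then
        if tautB (ncl c1 c2 l) then rez else PySem.Set.add rez (ncl c1 c2 l)
      else rez) [] := rfl
  rw [h, rezolva_mem_aux]
  simp [Res]

lemma mem_resolveB (c1 c2 e : List Int) : e ∈ resolveB c1 c2 ↔ Res c1 c2 e := by
  unfold resolveB Res
  rw [PySem.Set.mem_ofList]
  simp only [List.mem_filter, List.mem_map, Bool.not_eq_eq_eq_not, Bool.not_true,
    decide_eq_true_eq]
  constructor
  · rintro ⟨⟨l, ⟨hl1, hl2⟩, rfl⟩, htaut⟩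
    exact ⟨l, hl1, hl2, by simpa [tautB] using htaut, rfl⟩
  · rintro ⟨l, hl, hneg, htaut, rfl⟩
    exact ⟨⟨l, ⟨hl, hneg⟩, rfl⟩, by simpa [tautB] using htaut⟩

lemma Res_comm (c1 c2 e : List Int) : Res c1 c2 e ↔ Res c2 c1 e := by
  have key : ∀ a b : List Int, ∀ l : Int, ncl b a (-l) = ncl a b l := by
    intro a b l
    unfold ncl
    rw [neg_neg]
    exact canon_congr (by intro m; simp [List.mem_append]; tauto)
  constructor
  · rintro ⟨l, h1, h2, h3, rfl⟩
    exact ⟨-l, h2, by simpa using h1, by rw [key]; exact h3, by rw [key]⟩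
  · rintro ⟨l, h1, h2, h3, rfl⟩
    exact ⟨-l, h2, by simpa using h1, by rw [key]; exact h3, by rw [key]⟩

lemma Res_self (c e : List Int) (h0 : (0:Int) ∉ c) : ¬ Res c c e := by
  rintro ⟨l, hl, hnl, htaut, -⟩
  have hl0 : l ≠ 0 := fun h => h0 (h ▸ hl)
  have hne : l ≠ -l := by omega
  have hlnc : l ∈ ncl c c l := by
    rw [ncl, mem_canon]
    exact List.mem_append.mpr (Or.inr ((List.mem_erase_of_ne hne).mpr hl))
  have hnlnc : (-l) ∈ ncl c c l := by
    rw [ncl, mem_canon]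
    exact List.mem_append.mpr (Or.inl ((List.mem_erase_of_ne (by omega)).mpr hnl))
  have h : tautB (ncl c c l) = true := by
    rw [tautB, List.any_eq_true]
    exact ⟨l, hlnc, by simpa using hnlnc⟩
  rw [h] at htaut; cases htaut

lemma DC_tail {c : List Int} {t : List (List Int)} (h : DC (c :: t)) : DC t := by
  intro d hd hcount
  refine h d (List.mem_cons_of_mem _ hd) ?_
  rw [List.count_cons]
  split <;> omega

lemma DC_of_nodup {l : List (List Int)} (h : l.Nodup) : DC l := by
  intro c hc hcount
  have := List.nodup_iff_count_le_one.mp h c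
  omega

lemma pairs_res (e : List Int) : ∀ l : List (List Int), DC l →
    ((∃ p ∈ pairs l, Res p.1 p.2 e) ↔ MR l e) := by
  intro l
  induction l with
  | nil => simp [pairs, MR]
  | cons c t ih =>
    intro hDC
    have ihT := ih (DC_tail hDC)
    constructor
    · rintro ⟨p, hp, hres⟩
      rcases List.mem_append.mp hp with hp | hp
      · rcases List.mem_map.mp hp with ⟨d, hd, rfl⟩
        by_cases hdc : d = c
        · subst hdc
          have h2 : 2 ≤ (d :: t).count d := by
            have h1 : 0 < t.count d := List.count_pos_iff.mpr hd
            rw [List.count_cons_self]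
            omega
          exact absurd hres (Res_self _ _ (hDC d List.mem_cons_self h2))
        · exact ⟨c, List.mem_cons_self, d, List.mem_cons_of_mem _ hd, fun h => hdc h.symm, hres⟩
      · rcases ihT.mp ⟨p, hp, hres⟩ with ⟨a, ha, b, hb, hab, hr⟩
        exact ⟨a, List.mem_cons_of_mem _ ha, b, List.mem_cons_of_mem _ hb, hab, hr⟩
    · rintro ⟨a, ha, b, hb, hab, hres⟩
      rcases List.mem_cons.mp ha with hac | ha'
      · rcases List.mem_cons.mp hb with hbc | hb'
        · exact absurd (hac.trans hbc.symm) hab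
        · refine ⟨(c, b), List.mem_append.mpr (Or.inl (List.mem_map.mpr ⟨b, hb', rfl⟩)), ?_⟩
          rw [← hac]; exact hres
      · rcases List.mem_cons.mp hb with hbc | hb'
        · refine ⟨(c, a), List.mem_append.mpr (Or.inl (List.mem_map.mpr ⟨a, ha', rfl⟩)), ?_⟩
          rw [← hbc]; exact (Res_comm _ _ _).mp hres
        · rcases ihT.mpr ⟨a, ha', b, hb', hab, hres⟩ with ⟨p, hp, hr⟩
          exact ⟨p, List.mem_append.mpr (Or.inr hp), hr⟩

lemma MR_congr {l l' : List (List Int)} (h : ∀ x, x ∈ l ↔ x ∈ l') (e : List Int) :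
    MR l e ↔ MR l' e := by
  unfold MR
  constructor
  · rintro ⟨a, ha, b, hb, hab, hr⟩; exact ⟨a, (h a).mp ha, b, (h b).mp hb, hab, hr⟩
  · rintro ⟨a, ha, b, hb, hab, hr⟩; exact ⟨a, (h a).mpr ha, b, (h b).mpr hb, hab, hr⟩

lemma MR_split {S N : List (List Int)} (hN : ∀ x ∈ N, x ∈ S) (e : List Int) :
    MR S e ↔ Mrem S N e ∨ Mix N S e := by
  constructor
  · rintro ⟨a, ha, b, hb, hab, hr⟩
    by_cases haN : a ∈ N
    · exact Or.inr ⟨a, haN, b, hb, fun h => hab h.symm, hr⟩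
    · by_cases hbN : b ∈ N
      · exact Or.inr ⟨b, hbN, a, ha, hab, (Res_comm _ _ _).mp hr⟩
      · exact Or.inl ⟨a, ha, b, hb, haN, hbN, hab, hr⟩
  · rintro (⟨a, ha, b, hb, _, _, hab, hr⟩ | ⟨n, hn, c, hc, hcn, hr⟩)
    · exact ⟨a, ha, b, hb, hab, hr⟩
    · exact ⟨n, hN n hn, c, hc, fun h => hcn h.symm, hr⟩

-- membership in A's accumulated noi' after one round
lemma mem_noiRound (per : List ((List Int) × (List Int))) (noi : List (List Int)) (e : List Int) :
    e ∈ per.foldl (fun (acc : List (List Int)) (p : (List Int) × (List Int)) => (rezolva p.1 p.2).foldl (fun s x => PySem.Set.add s x) acc) noi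
    ↔ e ∈ noi ∨ ∃ p ∈ per, e ∈ rezolva p.1 p.2 := by
  induction per generalizing noi with
  | nil => simp
  | cons p t ih =>
    simp only [List.foldl_cons, ih, mem_foldl_setAdd]
    constructor
    · rintro ((h | h) | ⟨q, hq, hr⟩)
      · exact Or.inl h
      · exact Or.inr ⟨p, List.mem_cons_self, h⟩
      · exact Or.inr ⟨q, List.mem_cons_of_mem _ hq, hr⟩
    · rintro (h | ⟨q, hq, hr⟩)
      · exact Or.inl (Or.inl h)
      · rcases List.mem_cons.mp hq with rfl | hq
        · exact Or.inl (Or.inr hr)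
        · exact Or.inr ⟨q, hq, hr⟩

lemma mem_genInner (nn : List Int) (bb : List (List Int)) :
    ∀ (acc : List (List Int)) (e : List Int),
    e ∈ bb.foldl (fun acc2 c =>
        if c = nn then acc2
        else (resolveB nn c).foldl (fun s x => PySem.Set.add s x) acc2) acc
    ↔ e ∈ acc ∨ ∃ c ∈ bb, c ≠ nn ∧ e ∈ resolveB nn c := by
  induction bb with
  | nil => simp
  | cons c t ihc =>
    intro acc e
    simp only [List.foldl_cons]
    by_cases hc : c = nn
    · rw [if_pos hc, ihc]
      constructor
      · rintro (h | ⟨d, hd, hr⟩)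
        · exact Or.inl h
        · exact Or.inr ⟨d, List.mem_cons_of_mem _ hd, hr⟩
      · rintro (h | ⟨d, hd, hne, hr⟩)
        · exact Or.inl h
        · rcases List.mem_cons.mp hd with hdc | hd
          · exact absurd (hdc.trans hc) hne
          · exact Or.inr ⟨d, hd, hne, hr⟩
    · rw [if_neg hc, ihc]
      simp only [mem_foldl_setAdd]
      constructor
      · rintro ((h | h) | ⟨d, hd, hr⟩)
        · exact Or.inl h
        · exact Or.inr ⟨c, List.mem_cons_self, hc, h⟩
        · exact Or.inr ⟨d, List.mem_cons_of_mem _ hd, hr⟩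
      · rintro (h | ⟨d, hd, hne, hr⟩)
        · exact Or.inl (Or.inl h)
        · rcases List.mem_cons.mp hd with hdc | hd
          · exact Or.inl (Or.inr (hdc ▸ hr))
          · exact Or.inr ⟨d, hd, hne, hr⟩

lemma mem_genRound (bb : List (List Int)) : ∀ (nb acc : List (List Int)) (e : List Int),
    e ∈ nb.foldl (fun acc n =>
        bb.foldl (fun acc2 c =>
          if c = n then acc2
          else (resolveB n c).foldl (fun s x => PySem.Set.add s x) acc2) acc) acc
    ↔ e ∈ acc ∨ ∃ n ∈ nb, ∃ c ∈ bb, c ≠ n ∧ e ∈ resolveB n c := by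
  intro nb
  induction nb with
  | nil => simp
  | cons n t ihn =>
    intro acc e
    simp only [List.foldl_cons, ihn, mem_genInner]
    constructor
    · rintro ((h | ⟨c, hc, hcn, hr⟩) | ⟨m, hm, c, hc, hcm, hr⟩)
      · exact Or.inl h
      · exact Or.inr ⟨n, List.mem_cons_self, c, hc, hcn, hr⟩
      · exact Or.inr ⟨m, List.mem_cons_of_mem _ hm, c, hc, hcm, hr⟩
    · rintro (h | ⟨m, hm, c, hc, hcm, hr⟩)
      · exact Or.inl (Or.inl h)
      · rcases List.mem_cons.mp hm with rfl | hm
        · exact Or.inl (Or.inr ⟨c, hc, hcm, hr⟩)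
        · exact Or.inr ⟨m, hm, c, hc, hcm, hr⟩

lemma loopA_succ (fuel : Nat) (cl noi baza : List (List Int)) :
    loopA (fuel+1) cl noi baza =
    (if ∃ p ∈ pairs cl, [] ∈ rezolva p.1 p.2 then ((some true, none) : Option Bool × Option Bool)
     else
      if ∀ c ∈ (pairs cl).foldl (fun (acc : List (List Int)) (p : (List Int) × (List Int)) => (rezolva p.1 p.2).foldl (fun s x => PySem.Set.add s x) acc) noi, c ∈ baza then (some false, none)
      else
        loopA fuel
          (((pairs cl).foldl (fun (acc : List (List Int)) (p : (List Int) × (List Int)) => (rezolva p.1 p.2).foldl (fun s x => PySem.Set.add s x) acc) noi).foldl (fun s x => PySem.Set.add s x) baza)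
          ((pairs cl).foldl (fun (acc : List (List Int)) (p : (List Int) × (List Int)) => (rezolva p.1 p.2).foldl (fun s x => PySem.Set.add s x) acc) noi)
          (((pairs cl).foldl (fun (acc : List (List Int)) (p : (List Int) × (List Int)) => (rezolva p.1 p.2).foldl (fun s x => PySem.Set.add s x) acc) noi).foldl (fun s x => PySem.Set.add s x) baza)) := rfl

lemma loopB_succ (fuel : Nat) (base neu : List (List Int)) :
    loopB (fuel+1) base neu =
    (if neu = [] then ((some false, none) : Option Bool × Option Bool)
     else
      if [] ∈ neu.foldl (fun (acc : List (List Int)) (n : List Int) => base.foldl (fun acc2 c => if c = n then acc2 else (resolveB n c).foldl (fun s x => PySem.Set.add s x) acc2) acc) [] then (some true, none)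
      else
        if (neu.foldl (fun (acc : List (List Int)) (n : List Int) => base.foldl (fun acc2 c => if c = n then acc2 else (resolveB n c).foldl (fun s x => PySem.Set.add s x) acc2) acc) []).filter (fun r => decide (r ∉ base)) = [] then (some false, none)
        else
          loopB fuel
            (((neu.foldl (fun (acc : List (List Int)) (n : List Int) => base.foldl (fun acc2 c => if c = n then acc2 else (resolveB n c).foldl (fun s x => PySem.Set.add s x) acc2) acc) []).filter (fun r => decide (r ∉ base))).foldl (fun s x => PySem.Set.add s x) base)
            ((neu.foldl (fun (acc : List (List Int)) (n : List Int) => base.foldl (fun acc2 c => if c = n then acc2 else (resolveB n c).foldl (fun s x => PySem.Set.add s x) acc2) acc) []).filter (fun r => decide (r ∉ base)))) := rfl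

-- the round-synchronised simulation of loopA by loopB
lemma sim : ∀ (fuel : Nat) (cl noi baza bB nB : List (List Int)),
    baza.Nodup →
    (∀ x, x ∈ cl ↔ x ∈ baza) → DC cl →
    (∀ x ∈ noi, x ∈ baza) →
    (∀ x, x ∈ bB ↔ x ∈ baza) →
    (∀ x ∈ nB, x ∈ baza) →
    (∀ x, Mrem baza nB x → x ∈ baza) →
    ¬ Mrem baza nB [] →
    loopA fuel cl noi baza = loopB fuel bB nB := by
  intro fuel
  induction fuel with
  | zero => intros; rfl
  | succ fuel ih =>
    intro cl noi baza bB nB h0 h1 h2 h3 h4 h5 h6 h7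
    have hsplit : ∀ e, MR baza e ↔ Mrem baza nB e ∨ Mix nB baza e := fun e => MR_split h5 e
    have hMRcl : ∀ e, MR cl e ↔ MR baza e := fun e => MR_congr h1 e
    have hAtest : (∃ p ∈ pairs cl, [] ∈ rezolva p.1 p.2) ↔ MR baza [] := by
      rw [← hMRcl, ← pairs_res _ _ h2]
      constructor
      · rintro ⟨p, hp, hr⟩; exact ⟨p, hp, (mem_rezolva _ _ _).mp hr⟩
      · rintro ⟨p, hp, hr⟩; exact ⟨p, hp, (mem_rezolva _ _ _).mpr hr⟩
    have hgen : ∀ e, e ∈ nB.foldl (fun (acc : List (List Int)) (n : List Int) => bB.foldl (fun acc2 c => if c = n then acc2 else (resolveB n c).foldl (fun s x => PySem.Set.add s x) acc2) acc) [] ↔ Mix nB baza e := by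
      intro e
      rw [mem_genRound]
      unfold Mix
      constructor
      · rintro (h | ⟨n, hn, c, hc, hcn, hr⟩)
        · cases h
        · exact ⟨n, hn, c, (h4 c).mp hc, hcn, (mem_resolveB _ _ _).mp hr⟩
      · rintro ⟨n, hn, c, hc, hcn, hr⟩
        exact Or.inr ⟨n, hn, c, (h4 c).mpr hc, hcn, (mem_resolveB _ _ _).mpr hr⟩
    have hnoi : ∀ e, e ∈ (pairs cl).foldl (fun (acc : List (List Int)) (p : (List Int) × (List Int)) => (rezolva p.1 p.2).foldl (fun s x => PySem.Set.add s x) acc) noi ↔ e ∈ noi ∨ MR baza e := by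
      intro e
      rw [mem_noiRound, ← hMRcl, ← pairs_res _ _ h2]
      constructor
      · rintro (h | ⟨p, hp, hr⟩)
        · exact Or.inl h
        · exact Or.inr ⟨p, hp, (mem_rezolva _ _ _).mp hr⟩
      · rintro (h | ⟨p, hp, hr⟩)
        · exact Or.inl h
        · exact Or.inr ⟨p, hp, (mem_rezolva _ _ _).mpr hr⟩
    rw [loopA_succ, loopB_succ]
    by_cases hMix0 : Mix nB baza []
    · have hA : ∃ p ∈ pairs cl, [] ∈ rezolva p.1 p.2 :=
        hAtest.mpr ((hsplit []).mpr (Or.inr hMix0))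
      have hnBne : nB ≠ [] := by
        rcases hMix0 with ⟨n, hn, -⟩; exact List.ne_nil_of_mem hn
      rw [if_pos hA, if_neg hnBne, if_pos ((hgen []).mpr hMix0)]
    · have hnoMR : ¬ MR baza [] := fun h => ((hsplit []).mp h).elim h7 hMix0
      have hA : ¬ (∃ p ∈ pairs cl, [] ∈ rezolva p.1 p.2) := fun h => hnoMR (hAtest.mp h)
      by_cases hnB : nB = []
      · have hsub : ∀ c ∈ (pairs cl).foldl (fun (acc : List (List Int)) (p : (List Int) × (List Int)) => (rezolva p.1 p.2).foldl (fun s x => PySem.Set.add s x) acc) noi, c ∈ baza := by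
          intro c hc
          rcases (hnoi c).mp hc with h | h
          · exact h3 c h
          · rcases (hsplit c).mp h with h | h
            · exact h6 c h
            · rcases h with ⟨n, hn, -⟩
              rw [hnB] at hn; cases hn
        rw [if_neg hA, if_pos hsub, if_pos hnB]
      · rw [if_neg hA, if_neg hnB,
          if_neg (show ¬ ([] : List Int) ∈ _ from fun h => hMix0 ((hgen []).mp h))]
        by_cases hsat : ∀ e, Mix nB baza e → e ∈ baza
        · have hsubA : ∀ c ∈ (pairs cl).foldl (fun (acc : List (List Int)) (p : (List Int) × (List Int)) => (rezolva p.1 p.2).foldl (fun s x => PySem.Set.add s x) acc) noi, c ∈ baza := by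
            intro c hc
            rcases (hnoi c).mp hc with h | h
            · exact h3 c h
            · rcases (hsplit c).mp h with h | h
              · exact h6 c h
              · exact hsat c h
          have hsubB : (nB.foldl (fun (acc : List (List Int)) (n : List Int) => bB.foldl (fun acc2 c => if c = n then acc2 else (resolveB n c).foldl (fun s x => PySem.Set.add s x) acc2) acc) []).filter (fun r => decide (r ∉ bB)) = [] := by
            rw [List.filter_eq_nil_iff]
            intro a ha
            simp only [decide_eq_true_eq, not_not]
            exact (h4 a).mpr (hsat a ((hgen a).mp ha))
          rw [if_pos hsubA, if_pos hsubB]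
        · push Not at hsat
          rcases hsat with ⟨e0, hMixe0, he0⟩
          have he0b : e0 ∉ bB := fun h => he0 ((h4 e0).mp h)
          have hsubA : ¬ ∀ c ∈ (pairs cl).foldl (fun (acc : List (List Int)) (p : (List Int) × (List Int)) => (rezolva p.1 p.2).foldl (fun s x => PySem.Set.add s x) acc) noi, c ∈ baza := by
            intro hall
            exact he0 (hall e0 ((hnoi e0).mpr (Or.inr ((hsplit e0).mpr (Or.inr hMixe0)))))
          have hne' : (nB.foldl (fun (acc : List (List Int)) (n : List Int) => bB.foldl (fun acc2 c => if c = n then acc2 else (resolveB n c).foldl (fun s x => PySem.Set.add s x) acc2) acc) []).filter (fun r => decide (r ∉ bB)) ≠ [] :=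
            List.ne_nil_of_mem (List.mem_filter.mpr ⟨(hgen e0).mpr hMixe0, by simpa using he0b⟩)
          rw [if_neg hsubA, if_neg hne']
          have hnoi3 : ∀ e, e ∈ (pairs cl).foldl (fun (acc : List (List Int)) (p : (List Int) × (List Int)) => (rezolva p.1 p.2).foldl (fun s x => PySem.Set.add s x) acc) noi → e ∈ noi ∨ MR baza e := fun e => (hnoi e).mp
          have hbaza' : ∀ e, e ∈ ((pairs cl).foldl (fun (acc : List (List Int)) (p : (List Int) × (List Int)) => (rezolva p.1 p.2).foldl (fun s x => PySem.Set.add s x) acc) noi).foldl (fun s x => PySem.Set.add s x) baza ↔ e ∈ baza ∨ MR baza e := by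
            intro e
            rw [mem_foldl_setAdd]
            constructor
            · rintro (h | h)
              · exact Or.inl h
              · rcases (hnoi e).mp h with h | h
                · exact Or.inl (h3 e h)
                · exact Or.inr h
            · rintro (h | h)
              · exact Or.inl h
              · exact Or.inr ((hnoi e).mpr (Or.inr h))
          have hneu' : ∀ e, e ∈ (nB.foldl (fun (acc : List (List Int)) (n : List Int) => bB.foldl (fun acc2 c => if c = n then acc2 else (resolveB n c).foldl (fun s x => PySem.Set.add s x) acc2) acc) []).filter (fun r => decide (r ∉ bB)) ↔ Mix nB baza e ∧ e ∉ baza := by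
            intro e
            rw [List.mem_filter]
            simp only [decide_eq_true_eq]
            constructor
            · rintro ⟨h, hb⟩; exact ⟨(hgen e).mp h, fun hx => hb ((h4 e).mpr hx)⟩
            · rintro ⟨h, hb⟩; exact ⟨(hgen e).mpr h, fun hx => hb ((h4 e).mp hx)⟩
          have hbB' : ∀ e, e ∈ ((nB.foldl (fun (acc : List (List Int)) (n : List Int) => bB.foldl (fun acc2 c => if c = n then acc2 else (resolveB n c).foldl (fun s x => PySem.Set.add s x) acc2) acc) []).filter (fun r => decide (r ∉ bB))).foldl (fun s x => PySem.Set.add s x) bB ↔ e ∈ baza ∨ (Mix nB baza e ∧ e ∉ baza) := by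
            intro e
            rw [mem_foldl_setAdd]
            constructor
            · rintro (h | h)
              · exact Or.inl ((h4 e).mp h)
              · exact Or.inr ((hneu' e).mp h)
            · rintro (h | h)
              · exact Or.inl ((h4 e).mpr h)
              · exact Or.inr ((hneu' e).mpr h)
          have hSS : ∀ e, e ∈ ((nB.foldl (fun (acc : List (List Int)) (n : List Int) => bB.foldl (fun acc2 c => if c = n then acc2 else (resolveB n c).foldl (fun s x => PySem.Set.add s x) acc2) acc) []).filter (fun r => decide (r ∉ bB))).foldl (fun s x => PySem.Set.add s x) bB ↔ e ∈ ((pairs cl).foldl (fun (acc : List (List Int)) (p : (List Int) × (List Int)) => (rezolva p.1 p.2).foldl (fun s x => PySem.Set.add s x) acc) noi).foldl (fun s x => PySem.Set.add s x) baza := by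
            intro e
            rw [hbB', hbaza']
            constructor
            · rintro (h | ⟨h, -⟩)
              · exact Or.inl h
              · exact Or.inr ((hsplit e).mpr (Or.inr h))
            · rintro (h | h)
              · exact Or.inl h
              · rcases (hsplit e).mp h with hrem | hmix
                · exact Or.inl (h6 e hrem)
                · by_cases hb : e ∈ baza
                  · exact Or.inl hb
                  · exact Or.inr ⟨hmix, hb⟩
          have hclean : ∀ a, a ∈ ((pairs cl).foldl (fun (acc : List (List Int)) (p : (List Int) × (List Int)) => (rezolva p.1 p.2).foldl (fun s x => PySem.Set.add s x) acc) noi).foldl (fun s x => PySem.Set.add s x) baza →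
              a ∉ (nB.foldl (fun (acc : List (List Int)) (n : List Int) => bB.foldl (fun acc2 c => if c = n then acc2 else (resolveB n c).foldl (fun s x => PySem.Set.add s x) acc2) acc) []).filter (fun r => decide (r ∉ bB)) →
              a ∈ baza := by
            intro a ha hna
            rcases (hbaza' a).mp ha with h | h
            · exact h
            · rcases (hsplit a).mp h with h | h
              · exact h6 a h
              · by_cases hab : a ∈ baza
                · exact hab
                · exact absurd ((hneu' a).mpr ⟨h, hab⟩) hna
          refine ih _ _ _ _ _ (nodup_foldl_setAdd _ _ h0) (fun x => Iff.rfl)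
            (DC_of_nodup (nodup_foldl_setAdd _ _ h0)) ?_ hSS ?_ ?_ ?_
          · intro x hx
            exact (hbaza' x).mpr ((hnoi3 x hx).imp (h3 x) id)
          · intro x hx
            rcases (hneu' x).mp hx with ⟨hm, -⟩
            exact (hbaza' x).mpr (Or.inr ((hsplit x).mpr (Or.inr hm)))
          · rintro x ⟨a, ha, b, hb, haN, hbN, hab, hr⟩
            have hMRx : MR baza x := ⟨a, hclean a ha haN, b, hclean b hb hbN, hab, hr⟩
            rcases (hsplit x).mp hMRx with h | h
            · exact (hbaza' x).mpr (Or.inl (h6 x h))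
            · exact (hbaza' x).mpr (Or.inr ((hsplit x).mpr (Or.inr h)))
          · rintro ⟨a, ha, b, hb, haN, hbN, hab, hr⟩
            exact hnoMR ⟨a, hclean a ha haN, b, hclean b hb hbN, hab, hr⟩

lemma pre_dc (clauze : List (List Int)) (hPre : Pre_rezolutie_pl clauze) :
    DC (clauze.map canon) := by
  intro c' hc' hcount h0
  rcases List.mem_map.mp hc' with ⟨c, hc, rfl⟩
  have h0c : (0:Int) ∈ c := (mem_canon c 0).mp h0
  have hple : clauze.countP
      (fun d => d.all (fun x => c.contains x) && c.all (fun x => d.contains x)) ≤ 1 := by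
    have := (List.all_eq_true.mp hPre) c hc
    rcases Bool.or_eq_true_iff.mp this with h | h
    · rw [Bool.not_eq_eq_eq_not, Bool.not_true] at h
      rw [List.contains_eq_mem, decide_eq_false_iff_not] at h
      exact absurd h0c h
    · exact decide_eq_true_eq.mp h
  have himp : ∀ d ∈ clauze, (canon d == canon c) = true →
      ((d.all (fun x => c.contains x) && c.all (fun x => d.contains x)) = true) := by
    intro d _ hbeq
    have h : canon d = canon c := by simpa using hbeq
    have hm : ∀ x, x ∈ d ↔ x ∈ c := fun x => by rw [← mem_canon d x, h, mem_canon]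
    rw [Bool.and_eq_true, List.all_eq_true, List.all_eq_true]
    exact ⟨fun x hx => (List.contains_iff_mem).mpr ((hm x).mp hx),
           fun x hx => (List.contains_iff_mem).mpr ((hm x).mpr hx)⟩
  have hcnt : 2 ≤ clauze.countP
      (fun d => d.all (fun x => c.contains x) && c.all (fun x => d.contains x)) := by
    calc 2 ≤ (clauze.map canon).count (canon c) := hcount
    _ = clauze.countP (fun d => canon d == canon c) := by
        rw [List.count, List.countP_map]; rfl
    _ ≤ _ := List.countP_mono_left himp
  omega

-- ===== VERDICT (by name: the statement is the Claim_ definition above) =====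
theorem rezolutie_pl_spec : Claim_equal_rezolutie_pl := by
  intro clauze _ hPre
  unfold Spec_rezolutie_pl rezolutie_pl rezolutie_pl_alt
  have hB : ∀ x, x ∈ clauze.foldl (fun s c => PySem.Set.add s (canon c)) [] ↔
      x ∈ PySem.Set.ofList (clauze.map canon) := by
    intro x
    rw [PySem.Set.mem_foldl_add, PySem.Set.mem_ofList]
    simp [eq_comm]
  refine sim _ _ _ _ _ _ (PySem.Set.nodup_ofList _) (fun x => (PySem.Set.mem_ofList _ _).symm)
    (pre_dc clauze hPre) (by simp) (fun x => hB x) (fun x hx => (hB x).mp hx) ?_ ?_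
  · rintro x ⟨a, ha, b, hb, haN, hbN, hab, hr⟩
    exact absurd ((hB a).mpr ha) haN
  · rintro ⟨a, ha, b, hb, haN, hbN, hab, hr⟩
    exact absurd ((hB a).mpr ha) haN
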